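-- pv_equiv track=rewrite | github.com/mckirk/adventofcode | 2024py/day21/part1.py | get_seqs
-- ===== SOURCE A (Python) =====
-- def get_seqs(input_seq, shortest_paths):
--     res = [[]]
--     for i in range(len(input_seq) - 1):
--         new_res = []
--         for p in shortest_paths[(input_seq[i], input_seq[i + 1])]:
--             new_res.extend([r + p + ["A"] for r in res])
--         res = new_res
--     return res
-- ===== SOURCE B (Python) =====
-- def get_seqs(input_seq, shortest_paths):
--     # one lookup pass, then a recursive Cartesian product over the reversed
--     # option lists (so the first pair varies fastest, as in the original),
--     # then one assembly pass per combination
--     opts = [shortest_paths[(a, b)] for a, b in zip(input_seq, input_seq[1:])]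
--
--     def product(lists):
--         if not lists:
--             return [[]]
--         return [[x] + rest for x in lists[0] for rest in product(lists[1:])]
--
--     out = []
--     for combo in product(opts[::-1]):
--         seq = []
--         for p in reversed(combo):
--             seq += p + ["A"]
--         out.append(seq)
--     return out
-- ===== Notes on version B (the rewrite author's own statement) =====
-- stated objective: idiomatic
-- what changed: A rebuilds the whole result list at every step of the key sequence; B first collects the per-pair path-option lists, then enumerates all combinations with one recursive Cartesian product over the reversed option lists and assembles each sequence in a single pass.
import Mathlib
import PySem

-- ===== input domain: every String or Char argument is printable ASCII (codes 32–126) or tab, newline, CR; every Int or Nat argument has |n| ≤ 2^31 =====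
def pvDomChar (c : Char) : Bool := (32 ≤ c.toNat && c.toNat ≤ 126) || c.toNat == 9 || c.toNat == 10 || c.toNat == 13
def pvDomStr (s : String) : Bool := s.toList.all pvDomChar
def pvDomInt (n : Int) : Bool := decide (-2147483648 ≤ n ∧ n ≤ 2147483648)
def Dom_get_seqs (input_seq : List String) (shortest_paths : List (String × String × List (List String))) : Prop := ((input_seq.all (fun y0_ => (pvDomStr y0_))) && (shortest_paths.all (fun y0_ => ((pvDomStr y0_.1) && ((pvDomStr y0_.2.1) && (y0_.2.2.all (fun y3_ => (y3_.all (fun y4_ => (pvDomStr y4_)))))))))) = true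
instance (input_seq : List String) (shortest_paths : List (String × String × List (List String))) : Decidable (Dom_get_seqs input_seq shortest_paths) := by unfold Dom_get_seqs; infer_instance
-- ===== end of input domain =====

-- B replaces A's incremental rebuild-the-result-list-each-step accumulation with one
-- recursive Cartesian product over the reversed per-pair option lists followed by a
-- single assembly pass per combination (objective: more idiomatic decomposition).

-- ===== PORT A =====
-- shortest_paths[(a, b)]: first entry of the association list with key (a, b)
def spLookup (shortest_paths : List (String × String × List (List String))) (a b : String) : Option (List (List String)) :=
  (shortest_paths.find? (fun e => e.1 == a && e.2.1 == b)).map (fun e => e.2.2)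

-- literal port of A; indices i, i+1 are always in range, so xs[i] = getD i "".
-- On a missing key Python raises KeyError (excluded by Pre_); the port uses .getD [] there.
def get_seqs (input_seq : List String) (shortest_paths : List (String × String × List (List String))) : List (List String) :=
  (List.range (input_seq.length - 1)).foldl
    (fun res i =>
      ((spLookup shortest_paths (input_seq.getD i "") (input_seq.getD (i + 1) "")).getD []).foldl
        (fun new_res p => new_res ++ res.map (fun r => r ++ p ++ ["A"])) [])
    [[]]

-- ===== PORT B =====
-- recursive Cartesian product, first list outermost (Source B's `product`)
def pyProduct : List (List (List String)) → List (List (List String))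
  | [] => [[]]
  | l :: ls => l.flatMap (fun x => (pyProduct ls).map (fun rest => x :: rest))

def get_seqs_alt (input_seq : List String) (shortest_paths : List (String × String × List (List String))) : List (List String) :=
  let opts := (input_seq.zip input_seq.tail).map
    (fun ab => (spLookup shortest_paths ab.1 ab.2).getD [])
  (pyProduct opts.reverse).map
    (fun combo => combo.reverse.foldl (fun seq p => seq ++ p ++ ["A"]) [])

-- ===== PRECONDITION & SPEC =====
-- Pre_ excludes exactly the inputs where some consecutive pair is missing from
-- shortest_paths: there both Pythons raise KeyError.
def Pre_get_seqs (input_seq : List String) (shortest_paths : List (String × String × List (List String))) : Prop :=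
  ∀ ab ∈ input_seq.zip input_seq.tail, ∃ e ∈ shortest_paths, e.1 = ab.1 ∧ e.2.1 = ab.2
instance (input_seq : List String) (shortest_paths : List (String × String × List (List String))) : Decidable (Pre_get_seqs input_seq shortest_paths) := by unfold Pre_get_seqs; infer_instance

def pvWitness_get_seqs : List String × (List (String × String × List (List String))) :=
  (["a", "b"], [("a", "b", [["x"], ["y", "x"]])])

def Spec_get_seqs (input_seq : List String) (shortest_paths : List (String × String × List (List String))) (out : List (List String)) : Prop := out = get_seqs_alt input_seq shortest_paths
instance (input_seq : List String) (shortest_paths : List (String × String × List (List String))) (out : List (List String)) : Decidable (Spec_get_seqs input_seq shortest_paths out) := by unfold Spec_get_seqs; infer_instance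

-- ===== CLAIM (what is proved, stated in full; the proofs are below) =====
def Claim_equal_get_seqs : Prop := ∀ (input_seq : List String) (shortest_paths : List (String × String × List (List String))), Dom_get_seqs input_seq shortest_paths → Pre_get_seqs input_seq shortest_paths → Spec_get_seqs input_seq shortest_paths (get_seqs input_seq shortest_paths)

-- ===== LEMMAS AND PROOFS =====

-- A's index loop over range(len-1) is the loop over the consecutive-pair list
theorem foldl_range_zip {β : Type} (xs : List String)
    (g : β → String × String → β) (init : β) :
    (List.range (xs.length - 1)).foldl
      (fun res i => g res (xs.getD i "", xs.getD (i + 1) "")) init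
    = (xs.zip xs.tail).foldl g init := by
  induction xs generalizing init with
  | nil => simp
  | cons a xs ih =>
    cases xs with
    | nil => simp
    | cons b t =>
      have hlen : (a :: b :: t).length - 1 = (b :: t).length - 1 + 1 := by
        simp
      rw [hlen, List.range_succ_eq_map, List.foldl_cons, List.foldl_map]
      have := ih (init := g init (a, b))
      simpa using this

-- the inner 'for p: extend(map …)' loop is a flatMap
theorem inner_extend (o : List (List String)) (res acc : List (List String)) :
    o.foldl (fun new_res p => new_res ++ res.map (fun r => r ++ p ++ ["A"])) acc
    = acc ++ o.flatMap (fun p => res.map (fun r => r ++ p ++ ["A"])) := by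
  exact PySem.List.foldl_append_eq_flatMap _ _ _

-- core: A's accumulation over any option list equals product-then-assemble
theorem core (opts : List (List (List String))) :
    opts.foldl
      (fun res o => o.foldl
        (fun new_res p => new_res ++ res.map (fun r => r ++ p ++ ["A"])) [])
      [[]]
    = (pyProduct opts.reverse).map
        (fun combo => combo.reverse.foldl (fun seq p => seq ++ p ++ ["A"]) []) := by
  induction opts using List.reverseRecOn with
  | nil => simp [pyProduct]
  | append_singleton opts o ih =>
    rw [List.foldl_append, List.foldl_cons, List.foldl_nil, inner_extend,
      List.reverse_append]
    simp only [List.reverse_singleton, List.singleton_append, pyProduct]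
    rw [List.map_flatMap]
    apply List.flatMap_congr
    intro p _
    rw [ih, List.map_map, List.map_map]
    apply List.map_congr_left
    intro c _
    simp

-- ===== VERDICT (by name: the statement is the Claim_ definition above) =====
theorem get_seqs_spec : Claim_equal_get_seqs := by
  intro input_seq shortest_paths _ _
  show get_seqs input_seq shortest_paths = get_seqs_alt input_seq shortest_paths
  unfold get_seqs get_seqs_alt
  rw [foldl_range_zip (g := fun res ab =>
        ((spLookup shortest_paths ab.1 ab.2).getD []).foldl
          (fun new_res p => new_res ++ res.map (fun r => r ++ p ++ ["A"])) [])]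
  have h := core ((input_seq.zip input_seq.tail).map
    (fun ab => (spLookup shortest_paths ab.1 ab.2).getD []))
  simp only [List.foldl_map] at h
  simpa using h
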